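-- pv_equiv track=rewrite | github.com/ha0s/SkF_homework | tic-tac-toe.py | gen_field
-- ===== SOURCE A (Python) =====
-- symbol_null = '-'
--
-- def gen_field(size = 3):
--     size += 1
--     p = [[symbol_null for j in range(size)] for i in range(size)] # Генерируем пустое поле
--     for i in range(1, size): # Заполняем горизонтальный заголовок
--         p[0][i] = str(i)
--     for i in range(1, size): # Заполняем вертикальный заголовок
--         p[i][0] = str(i)
--     p[0][0] = ' '
--     return  p
-- ===== SOURCE B (Python) =====
-- symbol_null = '-'
--
-- def gen_field(size=3):
--     grid = [[' ']]
--     for k in range(1, size + 1):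
--         label = str(k)
--         for i, row in enumerate(grid):
--             row.append(label if i == 0 else symbol_null)
--         grid.append([label] + [symbol_null] * k)
--     return grid
-- ===== Notes on version B (the rewrite author's own statement) =====
-- stated objective: alternative
-- what changed: B grows the grid incrementally by bordering: starting from the 1x1 corner, each step k appends the new label/null cell to every existing row and adds one new labelled row, instead of A's allocate-all-'-'-then-patch-headers scheme.
import Mathlib
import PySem

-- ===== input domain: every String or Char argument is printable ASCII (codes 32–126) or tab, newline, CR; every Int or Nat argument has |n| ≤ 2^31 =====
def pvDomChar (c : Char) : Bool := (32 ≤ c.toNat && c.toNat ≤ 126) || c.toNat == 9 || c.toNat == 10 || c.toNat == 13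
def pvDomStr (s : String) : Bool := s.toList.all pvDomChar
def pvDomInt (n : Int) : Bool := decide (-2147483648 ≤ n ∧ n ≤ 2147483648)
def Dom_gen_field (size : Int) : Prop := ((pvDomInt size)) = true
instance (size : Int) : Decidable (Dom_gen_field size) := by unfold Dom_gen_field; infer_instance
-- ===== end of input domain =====

-- B grows the grid incrementally by bordering (append a cell to each row, add one new row per step) instead of A's allocate-then-patch passes (objective: alternative).

-- ===== PORT A =====
-- Index assignments p[0][i], p[i][0]: inside Pre_ every assigned index is a
-- nonnegative in-range Int, so List.set with .toNat is exact Python semantics here.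
def gen_field (size : Int) : List (List String) :=
  let n := size + 1
  let p := (PySem.List.pyRange 0 n 1).map (fun _ => (PySem.List.pyRange 0 n 1).map (fun _ => "-"))
  let p := (PySem.List.pyRange 1 n 1).foldl
    (fun q i => q.set 0 ((q.headD []).set i.toNat (PySem.Int.toStr i))) p
  let p := (PySem.List.pyRange 1 n 1).foldl
    (fun q i => q.set i.toNat ((q.getD i.toNat []).set 0 (PySem.Int.toStr i))) p
  p.set 0 ((p.headD []).set 0 " ")

-- ===== PORT B =====
def gen_field_alt (size : Int) : List (List String) :=
  (PySem.List.pyRange 1 (size + 1) 1).foldl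
    (fun grid k =>
      let label := PySem.Int.toStr k
      ((PySem.List.enumerate grid 0).map
        (fun p => p.2 ++ [if p.1 = 0 then label else "-"])) ++
      [label :: List.replicate k.toNat "-"])
    [[" "]]

-- ===== PRECONDITION & SPEC =====
-- A raises IndexError for negative size (the corner assignment p[0][0] on an empty grid).
def Pre_gen_field (size : Int) : Prop := 0 ≤ size
instance (size : Int) : Decidable (Pre_gen_field size) := by unfold Pre_gen_field; infer_instance
def pvWitness_gen_field : Int := (3)

def Spec_gen_field (size : Int) (out : List (List String)) : Prop := out = gen_field_alt size
instance (size : Int) (out : List (List String)) : Decidable (Spec_gen_field size out) := by unfold Spec_gen_field; infer_instance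

-- ===== CLAIM (what is proved, stated in full; the proofs are below) =====
def Claim_equal_gen_field : Prop := ∀ (size : Int), Dom_gen_field size → Pre_gen_field size → Spec_gen_field size (gen_field size)

-- ===== LEMMAS AND PROOFS =====

-- the labelled grid as a closed-form comprehension; both ports are proved equal to it
def pvComp (size : Int) : List (List String) :=
  let n := size + 1
  (PySem.List.pyRange 0 n 1).map (fun i =>
    if i = 0 then " " :: (PySem.List.pyRange 1 n 1).map PySem.Int.toStr
    else PySem.Int.toStr i :: List.replicate (n - 1).toNat "-")

-- folding `set` at the indices of a list preserves length
theorem pv_len_foldl_set {α : Type} (l : List Int) (f : Int → α) (r : List α) :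
    (l.foldl (fun r i => r.set i.toNat (f i)) r).length = r.length := by
  induction l generalizing r with
  | nil => rfl
  | cons i l ih => rw [List.foldl_cons, ih]; simp

-- element of a fold of `set (f i)` over nonnegative indices
theorem pv_getElem?_foldl_set {α : Type} (l : List Int) (h0 : ∀ i ∈ l, 0 ≤ i)
    (f : Int → α) (r : List α) (k : Nat) (hk : k < r.length) :
    (l.foldl (fun r i => r.set i.toNat (f i)) r)[k]?
      = some (if (k : Int) ∈ l then f k else r[k]) := by
  induction l generalizing r with
  | nil => simp [List.getElem?_eq_getElem hk]
  | cons i l ih =>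
    have hi : 0 ≤ i := h0 i (List.mem_cons_self)
    rw [List.foldl_cons, ih (fun j hj => h0 j (List.mem_cons_of_mem _ hj)) _ (by simpa using hk)]
    by_cases hkl : (k : Int) ∈ l
    · simp [hkl]
    · by_cases hik : i = (k : Int)
      · subst hik
        simp [hkl]
      · have hne : i.toNat ≠ k := by omega
        have hik' : ¬ ((k : Int) = i) := fun h => hik h.symm
        simp [hkl, hne, hik']

-- folding a row-modify (set index i to a function of row i) preserves length
theorem pv_len_foldl_mod {α : Type} (l : List Int) (u : Int → List α → List α) (q : List (List α)) :
    (l.foldl (fun q i => q.set i.toNat (u i (q.getD i.toNat []))) q).length = q.length := by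
  induction l generalizing q with
  | nil => rfl
  | cons i l ih => rw [List.foldl_cons, ih]; simp

-- element of a fold of self-row modifications over distinct nonnegative indices
theorem pv_getElem?_foldl_mod {α : Type} (l : List Int) (hnd : l.Nodup)
    (h0 : ∀ i ∈ l, 0 ≤ i) (u : Int → List α → List α) (q : List (List α))
    (k : Nat) (hk : k < q.length) :
    (l.foldl (fun q i => q.set i.toNat (u i (q.getD i.toNat []))) q)[k]?
      = some (if (k : Int) ∈ l then u k (q.getD k []) else q[k]) := by
  induction l generalizing q with
  | nil => simp [List.getElem?_eq_getElem hk]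
  | cons i l ih =>
    have hi : 0 ≤ i := h0 i (List.mem_cons_self)
    rw [List.foldl_cons, ih hnd.of_cons (fun j hj => h0 j (List.mem_cons_of_mem _ hj)) _ (by simpa using hk)]
    by_cases hkl : (k : Int) ∈ l
    · have hik : i ≠ (k : Int) := by
        intro h; subst h; exact (List.nodup_cons.mp hnd).1 hkl
      have hne : i.toNat ≠ k := by omega
      simp [hkl, List.getD_eq_getElem?_getD, hne]
    · by_cases hik : i = (k : Int)
      · subst hik
        simp [hkl, List.getD_eq_getElem?_getD, List.getElem?_eq_getElem hk]
      · have hne : i.toNat ≠ k := by omega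
        have hik' : ¬ ((k : Int) = i) := fun h => hik h.symm
        simp [hkl, hne, hik']

-- A's first header loop only rewrites row 0, so it acts on the head alone
theorem pv_foldl_head_set (l : List Int) (a : List String) (t : List (List String)) :
    l.foldl (fun q i => q.set 0 ((q.headD []).set i.toNat (PySem.Int.toStr i))) (a :: t)
      = l.foldl (fun r i => r.set i.toNat (PySem.Int.toStr i)) a :: t := by
  induction l generalizing a with
  | nil => rfl
  | cons i l ih =>
    rw [List.foldl_cons, List.foldl_cons]
    simp only [List.headD_cons, List.set_cons_zero]
    exact ih _

-- A equals the closed-form comprehension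
theorem pv_A_eq_comp (m : Nat) : gen_field (m : Int) = pvComp (m : Int) := by
  unfold gen_field pvComp
  simp only
  have hconst2 : (PySem.List.pyRange 0 ((m : Int) + 1) 1).map
      (fun _ => (PySem.List.pyRange 0 ((m : Int) + 1) 1).map fun _ => "-")
      = List.replicate (m + 1) (List.replicate (m + 1) "-") := by
    rw [List.map_const', List.map_const', PySem.List.length_pyRange_one]
    norm_num
  rw [hconst2, List.replicate_succ, pv_foldl_head_set]
  set A0 := (PySem.List.pyRange 1 ((m : Int) + 1) 1).foldl
      (fun r i => r.set i.toNat (PySem.Int.toStr i)) (List.replicate (m + 1) "-") with hA0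
  have hmem : ∀ (x : Int), x ∈ PySem.List.pyRange 1 ((m : Int) + 1) 1 ↔ 1 ≤ x ∧ x < (m : Int) + 1 := by
    intro x; exact PySem.List.mem_pyRange_one
  have hpos : ∀ i ∈ PySem.List.pyRange 1 ((m : Int) + 1) 1, 0 ≤ i := by
    intro i hi; have := (hmem i).mp hi; omega
  have hndp : (PySem.List.pyRange 1 ((m : Int) + 1) 1).Nodup := PySem.List.nodup_pyRange_one 1 ((m : Int) + 1)
  have hA0len : A0.length = m + 1 := by
    rw [hA0, pv_len_foldl_set]; simp
  have hA0get : ∀ (k : Nat), k < m + 1 →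
      A0[k]? = some (if 1 ≤ k ∧ k < m + 1 then PySem.Int.toStr k else "-") := by
    intro k hk
    rw [hA0, pv_getElem?_foldl_set _ hpos _ _ k (by simp; omega)]
    simp only [hmem]
    by_cases h : 1 ≤ k ∧ k < m + 1
    · have hc : (1 : Int) ≤ (k : Int) ∧ (k : Int) < (m : Int) + 1 := by
        constructor <;> [exact_mod_cast h.1; exact_mod_cast (by omega : (k:Int) < (m:Int)+1)]
      simp [hc, h]
    · have hc : ¬ ((1 : Int) ≤ (k : Int) ∧ (k : Int) < (m : Int) + 1) := by omega
      simp [List.getElem_replicate]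
  have hrow0 : A0.set 0 " " = " " :: (PySem.List.pyRange 1 ((m : Int) + 1) 1).map PySem.Int.toStr := by
    apply List.ext_getElem?
    intro k
    match k with
    | 0 =>
      rw [List.getElem?_set_self (by omega)]
      simp
    | Nat.succ j =>
      rw [List.getElem?_set_ne (by omega)]
      by_cases hj : j + 1 < m + 1
      · rw [hA0get (j+1) hj]
        have hp : 1 ≤ j + 1 ∧ j + 1 < m + 1 := ⟨by omega, hj⟩
        rw [if_pos hp]
        have hjlen : j < ((PySem.List.pyRange 1 ((m : Int) + 1) 1).map PySem.Int.toStr).length := by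
          simp [PySem.List.length_pyRange_one]; omega
        rw [List.getElem?_cons_succ, List.getElem?_eq_getElem hjlen]
        rw [List.getElem_map, PySem.List.getElem_pyRange_one]
        norm_num [add_comm]
      · rw [List.getElem?_eq_none (by omega), List.getElem?_eq_none (by simp [PySem.List.length_pyRange_one]; omega)]
  apply List.ext_getElem?
  intro k
  set p2 := (PySem.List.pyRange 1 ((m : Int) + 1) 1).foldl
      (fun q i => q.set i.toNat ((q.getD i.toNat []).set 0 (PySem.Int.toStr i)))
      (A0 :: List.replicate m (List.replicate (m + 1) "-")) with hp2
  have hp2len : p2.length = m + 1 := by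
    rw [hp2]
    exact (pv_len_foldl_mod (PySem.List.pyRange 1 ((m : Int) + 1) 1)
      (fun i row => row.set 0 (PySem.Int.toStr i)) _).trans (by simp)
  have hlhs := fun (k : Nat) (hk : k < m + 1) => pv_getElem?_foldl_mod (PySem.List.pyRange 1 ((m : Int) + 1) 1) hndp hpos
    (fun i row => row.set 0 (PySem.Int.toStr i))
    (A0 :: List.replicate m (List.replicate (m + 1) "-")) k (by simp; omega)
  by_cases hk : k < m + 1
  · have hrhs : ((PySem.List.pyRange 0 ((m : Int) + 1) 1).map (fun i =>
        if i = 0 then " " :: (PySem.List.pyRange 1 ((m : Int) + 1) 1).map PySem.Int.toStr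
        else PySem.Int.toStr i :: List.replicate (((m : Int) + 1) - 1).toNat "-"))[k]?
        = some (if (k : Int) = 0 then " " :: (PySem.List.pyRange 1 ((m : Int) + 1) 1).map PySem.Int.toStr
          else PySem.Int.toStr k :: List.replicate (((m : Int) + 1) - 1).toNat "-") := by
      have hklen : k < ((PySem.List.pyRange 0 ((m : Int) + 1) 1).map (fun i =>
          if i = 0 then " " :: (PySem.List.pyRange 1 ((m : Int) + 1) 1).map PySem.Int.toStr
          else PySem.Int.toStr i :: List.replicate (((m : Int) + 1) - 1).toNat "-")).length := by
        simp [PySem.List.length_pyRange_one]; omega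
      rw [List.getElem?_eq_getElem hklen, List.getElem_map, PySem.List.getElem_pyRange_one]
      norm_num
    rw [hrhs]
    by_cases hk0 : k = 0
    · subst hk0
      rw [List.getElem?_set_self (by omega)]
      have h0mem : ¬ ((0 : Int) ∈ PySem.List.pyRange 1 ((m : Int) + 1) 1) := by
        rw [hmem]; omega
      have hhead : p2.headD [] = A0 := by
        have := hlhs 0 (by omega)
        rw [← hp2] at this
        simp only [Nat.cast_zero] at this
        rw [if_neg h0mem] at this
        simp only [List.getElem_cons_zero] at this
        rw [List.headD_eq_head?_getD, List.head?_eq_getElem?, this]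
        rfl
      rw [hhead, hrow0]
      simp
    · rw [List.getElem?_set_ne (by omega)]
      have hkmem : (k : Int) ∈ PySem.List.pyRange 1 ((m : Int) + 1) 1 := by
        rw [hmem]; constructor
        · exact_mod_cast (by omega : 1 ≤ k)
        · exact_mod_cast (by omega : (k:Int) < (m:Int)+1)
      have := hlhs k hk
      rw [← hp2, if_pos hkmem] at this
      rw [this]
      have hgetD : (A0 :: List.replicate m (List.replicate (m + 1) "-")).getD k []
          = List.replicate (m + 1) "-" := by
        match k, hk0 with
        | Nat.succ j, _ =>
          rw [List.getD_cons_succ, List.getD_eq_getElem?_getD,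
            List.getElem?_eq_getElem (by simp; omega : j < (List.replicate m (List.replicate (m+1) "-")).length)]
          simp
      rw [hgetD]
      have hm : ((((m : Int) + 1) - 1)).toNat = m := by omega
      rw [hm, List.replicate_succ, List.set_cons_zero]
      rw [if_neg (by exact_mod_cast hk0 : ¬ ((k : Int) = 0))]
  · rw [List.getElem?_eq_none (by rw [List.length_set, hp2len]; omega),
      List.getElem?_eq_none (by simp [PySem.List.length_pyRange_one]; omega)]

-- the comprehension, elementwise
theorem pv_comp_len (m : Nat) : (pvComp (m : Int)).length = m + 1 := by
  unfold pvComp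
  simp [PySem.List.length_pyRange_one]

theorem pv_comp_get (m k : Nat) (hk : k < m + 1) :
    (pvComp (m : Int))[k]? = some (if (k : Int) = 0
      then " " :: (PySem.List.pyRange 1 ((m : Int) + 1) 1).map PySem.Int.toStr
      else PySem.Int.toStr k :: List.replicate m "-") := by
  unfold pvComp
  simp only
  have hklen : k < (PySem.List.pyRange 0 ((m : Int) + 1) 1).length := by
    simp [PySem.List.length_pyRange_one]; omega
  rw [List.getElem?_map, List.getElem?_eq_getElem hklen, PySem.List.getElem_pyRange_one]
  have hm : ((((m : Int) + 1) - 1)).toNat = m := by omega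
  norm_num [hm]

-- B (recursive bordering) equals the closed-form comprehension
theorem pv_alt_eq_comp (m : Nat) : gen_field_alt (m : Int) = pvComp (m : Int) := by
  induction m with
  | zero =>
    unfold gen_field_alt
    rw [PySem.List.pyRange_one_eq_nil (by norm_num)]
    decide
  | succ m ih =>
    unfold gen_field_alt
    rw [show (((m + 1 : Nat)) : Int) + 1 = ((m : Int) + 1) + 1 by push_cast; ring,
      PySem.List.pyRange_one_succ_right (by omega), List.foldl_append]
    rw [show (PySem.List.pyRange 1 ((m : Int) + 1) 1).foldl
        (fun grid k =>
          ((PySem.List.enumerate grid 0).map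
            (fun p => p.2 ++ [if p.1 = 0 then PySem.Int.toStr k else "-"])) ++
          [PySem.Int.toStr k :: List.replicate k.toNat "-"]) [[" "]]
        = gen_field_alt (m : Int) from rfl, ih]
    simp only [List.foldl_cons, List.foldl_nil]
    push_cast
    apply List.ext_getElem?
    intro k
    by_cases hk : k < m + 2
    · have hrhs := pv_comp_get (m + 1) k (by omega)
      push_cast at hrhs
      rw [hrhs]
      by_cases hk1 : k < m + 1
      · have hlen : k < ((PySem.List.enumerate (pvComp (m : Int)) 0).map
            (fun p => p.2 ++ [if p.1 = 0 then PySem.Int.toStr ((m : Nat) + 1 : Int) else "-"])).length := by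
          simp [PySem.List.length_enumerate, pv_comp_len]; omega
        rw [List.getElem?_append_left (by simpa using hlen), List.getElem?_map,
          PySem.List.getElem?_enumerate, pv_comp_get m k hk1]
        simp only [Option.map_some]
        by_cases hk0 : (k : Int) = 0
        · rw [if_pos hk0]
          rw [PySem.List.pyRange_one_succ_right (show (1:Int) ≤ (m:Int)+1 by omega), List.map_append]
          simp [hk0]
        · rw [if_neg hk0]
          simp only [zero_add, if_neg hk0]
          rw [List.cons_append, ← List.replicate_succ']
      · have hkm : k = m + 1 := by omega
        subst hkm
        have hlen : ((PySem.List.enumerate (pvComp (m : Int)) 0).map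
            (fun p => p.2 ++ [if p.1 = 0 then PySem.Int.toStr ((m : Nat) + 1 : Int) else "-"])).length = m + 1 := by
          simp [PySem.List.length_enumerate, pv_comp_len]
        rw [List.getElem?_append_right (by rw [hlen])]
        rw [hlen]
        simp only [Nat.sub_self]
        rw [if_neg (show ¬ (((m + 1 : Nat)) : Int) = 0 by push_cast; omega)]
        have ht : ((m : Int) + 1).toNat = m + 1 := by omega
        simp [ht]
    · rw [List.getElem?_eq_none, List.getElem?_eq_none]
      · have := pv_comp_len (m + 1)
        push_cast at this ⊢
        omega
      · simp [PySem.List.length_enumerate, pv_comp_len]; omega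

-- ===== VERDICT =====
theorem gen_field_spec : Claim_equal_gen_field := by
  intro size _ hpre
  unfold Spec_gen_field
  obtain ⟨m, rfl⟩ := Int.eq_ofNat_of_zero_le hpre
  rw [pv_A_eq_comp, pv_alt_eq_comp]
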